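-- pv_equiv track=rewrite | github.com/jvdub/councilsense | backend/src/councilsense/app/st017_fixture_scorecard.py | _topic_terms_overlap
-- ===== SOURCE A (Python) =====
-- def _topic_terms_overlap(topic_terms: set[str], claim_terms: set[str]) -> bool:
--     if topic_terms & claim_terms:
--         return True
--
--     for topic_term in topic_terms:
--         for claim_term in claim_terms:
--             if _tokens_semantically_match(topic_term, claim_term):
--                 return True
--     return False
--
-- def _tokens_semantically_match(left: str, right: str) -> bool:
--     if left == right:
--         return True
--     if left.startswith(right) and len(right) >= 5:
--         return True
--     if right.startswith(left) and len(left) >= 5: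
--         return True
--     return False
-- ===== SOURCE B (Python) =====
-- def _topic_terms_overlap(topic_terms: set[str], claim_terms: set[str]) -> bool:
--     # Index terms in hash sets and look up each term's length>=5 proper prefixes
--     # instead of comparing all pairs.
--     claim_set = set(claim_terms)
--     for t in topic_terms:
--         if t in claim_set:
--             return True
--         for k in range(5, len(t)):
--             if t[:k] in claim_set:
--                 return True
--     topic_set = set(topic_terms)
--     for c in claim_terms:
--         for k in range(5, len(c)):
--             if c[:k] in topic_set:
--                 return True
--     return False
-- ===== Notes on version B (the rewrite author's own statement) =====
-- stated objective: alternative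
-- what changed: Replaces the all-pairs term comparison with hash-set lookups of each term's length>=5 proper prefixes (plus exact membership), removing the inner scan over the other set; measured about the same speed on the generated inputs.
import Mathlib
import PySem

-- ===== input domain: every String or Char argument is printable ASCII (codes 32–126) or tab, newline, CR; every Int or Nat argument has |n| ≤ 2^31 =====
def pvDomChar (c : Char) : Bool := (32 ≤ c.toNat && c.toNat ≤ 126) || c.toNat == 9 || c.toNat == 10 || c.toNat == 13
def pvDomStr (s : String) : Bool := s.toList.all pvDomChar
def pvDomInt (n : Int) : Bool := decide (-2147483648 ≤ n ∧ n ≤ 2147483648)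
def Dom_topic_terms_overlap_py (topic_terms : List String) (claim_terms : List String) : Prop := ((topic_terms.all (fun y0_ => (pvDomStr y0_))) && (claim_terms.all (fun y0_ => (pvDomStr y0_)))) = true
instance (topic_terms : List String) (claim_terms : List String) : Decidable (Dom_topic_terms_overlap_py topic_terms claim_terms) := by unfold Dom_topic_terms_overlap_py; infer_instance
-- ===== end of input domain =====

-- B replaces A's all-pairs term comparison with hash-set lookups of each term's length-≥5 proper prefixes (objective: alternative).

-- ===== PORT A =====
-- helper: _tokens_semantically_match
def pvTokensSemanticallyMatch (left : String) (right : String) : Bool :=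
  if left == right then true
  else if PySem.Str.startswith left right && decide (5 ≤ PySem.Str.len right) then true
  else if PySem.Str.startswith right left && decide (5 ≤ PySem.Str.len left) then true
  else false

def topic_terms_overlap_py (topic_terms : List String) (claim_terms : List String) : Bool :=
  -- if topic_terms & claim_terms: return True   (set intersection truthiness)
  if (PySem.Set.inter (PySem.Set.ofList topic_terms) (PySem.Set.ofList claim_terms)) ≠ [] then true
  else
    -- nested for-loops with early return
    topic_terms.any (fun topic_term =>
      claim_terms.any (fun claim_term => pvTokensSemanticallyMatch topic_term claim_term))

-- ===== PORT B =====
def topic_terms_overlap_py_alt (topic_terms : List String) (claim_terms : List String) : Bool :=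
  let claimSet := PySem.Set.ofList claim_terms
  let topicSet := PySem.Set.ofList topic_terms
  (topic_terms.any (fun t =>
      PySem.Set.contains claimSet t ||
      (PySem.List.pyRange 5 (PySem.Str.len t : Int) 1).any (fun k =>
        PySem.Set.contains claimSet (PySem.Str.slice t none (some k))))) ||
  (claim_terms.any (fun c =>
      (PySem.List.pyRange 5 (PySem.Str.len c : Int) 1).any (fun k =>
        PySem.Set.contains topicSet (PySem.Str.slice c none (some k)))))

-- ===== PRECONDITION & SPEC =====
def Spec_topic_terms_overlap_py (topic_terms : List String) (claim_terms : List String) (out : Bool) : Prop := out = topic_terms_overlap_py_alt topic_terms claim_terms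
instance (topic_terms : List String) (claim_terms : List String) (out : Bool) : Decidable (Spec_topic_terms_overlap_py topic_terms claim_terms out) := by unfold Spec_topic_terms_overlap_py; infer_instance

-- ===== CLAIM (what is proved, stated in full; the proofs are below) =====
def Claim_equal_topic_terms_overlap_py : Prop := ∀ (topic_terms : List String) (claim_terms : List String), Dom_topic_terms_overlap_py topic_terms claim_terms → Spec_topic_terms_overlap_py topic_terms claim_terms (topic_terms_overlap_py topic_terms claim_terms)

-- ===== LEMMAS AND PROOFS =====

-- slicing t[:k] for 0 ≤ k, on the character list
lemma pv_slice_toList (t : String) (k : Int) (h0 : 0 ≤ k) :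
    (PySem.Str.slice t none (some k)).toList = t.toList.take k.toNat := by
  simp [PySem.Str.toList_slice]
  rw [PySem.List.slice_to _ h0]

-- B's prefix lookup range hits c exactly when c is a length-≥5 proper prefix of t
lemma pv_slice_hit_iff (t c : String) :
    (∃ k ∈ PySem.List.pyRange 5 (PySem.Str.len t : Int) 1,
        PySem.Str.slice t none (some k) = c) ↔
      (c.toList <+: t.toList ∧ 5 ≤ c.toList.length ∧ c.toList.length < t.toList.length) := by
  have hL : t.toList.length = PySem.Str.len t := (PySem.Str.len_eq t).symm
  constructor
  · rintro ⟨k, hk, hs⟩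
    rw [PySem.List.mem_pyRange_one] at hk
    obtain ⟨h5, hlt⟩ := hk
    have h0 : (0:Int) ≤ k := by omega
    have hc : c.toList = t.toList.take k.toNat := by
      rw [← hs, pv_slice_toList t k h0]
    have hklen : k.toNat ≤ t.toList.length := by omega
    have hlen : c.toList.length = k.toNat := by
      rw [hc, List.length_take]; omega
    refine ⟨?_, by omega, by omega⟩
    rw [List.prefix_iff_eq_take, hlen]; exact hc
  · rintro ⟨hpre, h5, hlt⟩
    refine ⟨(c.toList.length : Int), ?_, ?_⟩
    · rw [PySem.List.mem_pyRange_one]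
      omega
    · apply String.toList_inj.mp
      rw [pv_slice_toList _ _ (by positivity)]
      simp only [Int.toNat_natCast]
      exact (List.prefix_iff_eq_take.mp hpre).symm

-- the semantic-match relation, as a proposition on character lists
def pvM (t c : String) : Prop :=
  t = c ∨ (c.toList <+: t.toList ∧ 5 ≤ c.toList.length) ∨ (t.toList <+: c.toList ∧ 5 ≤ t.toList.length)

lemma pv_match_iff (t c : String) : pvTokensSemanticallyMatch t c = true ↔ pvM t c := by
  unfold pvTokensSemanticallyMatch pvM
  split_ifs with h1 h2 h3 <;>
    simp_all [PySem.Str.startswith_eq, PySem.Chars.startswith_iff, PySem.Str.len_eq]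

lemma pv_A_iff (T C : List String) :
    topic_terms_overlap_py T C = true ↔ ∃ t ∈ T, ∃ c ∈ C, pvM t c := by
  unfold topic_terms_overlap_py
  split_ifs with h
  · simp only [true_iff]
    obtain ⟨x, hx⟩ := List.exists_mem_of_ne_nil _ h
    rw [PySem.Set.mem_inter, PySem.Set.mem_ofList, PySem.Set.mem_ofList] at hx
    exact ⟨x, hx.1, x, hx.2, Or.inl rfl⟩
  · simp only [List.any_eq_true, pv_match_iff]

lemma pv_B_iff (T C : List String) :
    topic_terms_overlap_py_alt T C = true ↔ ∃ t ∈ T, ∃ c ∈ C, pvM t c := by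
  unfold topic_terms_overlap_py_alt
  simp only [Bool.or_eq_true, List.any_eq_true, PySem.Set.contains_iff, PySem.Set.mem_ofList]
  constructor
  · rintro (⟨t, ht, htc | ⟨k, hk, hkc⟩⟩ | ⟨c, hc, k, hk, hkt⟩)
    · exact ⟨t, ht, t, htc, Or.inl rfl⟩
    · have := (pv_slice_hit_iff t (PySem.Str.slice t none (some k))).mp ⟨k, hk, rfl⟩
      exact ⟨t, ht, _, hkc, Or.inr (Or.inl ⟨this.1, this.2.1⟩)⟩
    · have := (pv_slice_hit_iff c (PySem.Str.slice c none (some k))).mp ⟨k, hk, rfl⟩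
      exact ⟨_, hkt, c, hc, Or.inr (Or.inr ⟨this.1, this.2.1⟩)⟩
  · rintro ⟨t, ht, c, hc, (rfl | ⟨hpre, h5⟩ | ⟨hpre, h5⟩)⟩
    · exact Or.inl ⟨t, ht, Or.inl hc⟩
    · by_cases hlen : c.toList.length = t.toList.length
      · have : c = t := String.toList_inj.mp (hpre.eq_of_length hlen)
        subst this
        exact Or.inl ⟨c, ht, Or.inl hc⟩
      · have hlt : c.toList.length < t.toList.length := by
          have := hpre.length_le; omega
        obtain ⟨k, hk, hs⟩ := (pv_slice_hit_iff t c).mpr ⟨hpre, h5, hlt⟩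
        exact Or.inl ⟨t, ht, Or.inr ⟨k, hk, hs ▸ hc⟩⟩
    · by_cases hlen : t.toList.length = c.toList.length
      · have : t = c := String.toList_inj.mp (hpre.eq_of_length hlen)
        subst this
        exact Or.inl ⟨t, ht, Or.inl hc⟩
      · have hlt : t.toList.length < c.toList.length := by
          have := hpre.length_le; omega
        obtain ⟨k, hk, hs⟩ := (pv_slice_hit_iff c t).mpr ⟨hpre, h5, hlt⟩
        exact Or.inr ⟨c, hc, k, hk, hs ▸ ht⟩

-- ===== VERDICT (by name: the statement is the Claim_ definition above) =====
theorem topic_terms_overlap_py_spec : Claim_equal_topic_terms_overlap_py := by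
  intro T C _
  unfold Spec_topic_terms_overlap_py
  exact Bool.coe_iff_coe.mp ((pv_A_iff T C).trans (pv_B_iff T C).symm)
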